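-- pv_equiv track=rewrite | github.com/Bombbird2001/Meta-Hacker-Cup | 2022/Qualification Round/C1.py | get_other_possible_code_words
-- ===== SOURCE A (Python) =====
-- import copy
-- from typing import List
--
-- def get_other_possible_code_words(curr_code_word: str, curr_index: int, word_to_modify: List[str],
--                                   word_list: List[str], required_count: int) -> List[str]:
--     if len(word_list) >= required_count:
--         return word_list
--     if curr_index >= len(word_to_modify):
--         original_word_joined = "".join(word_to_modify)
--         if curr_code_word not in original_word_joined:
--             word_list.append(original_word_joined)
--         return word_list
--     word_modified = copy.copy(word_to_modify)
--     word_modified[curr_index] = "-"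
--     get_other_possible_code_words(curr_code_word, curr_index + 1, word_to_modify, word_list, required_count)
--     get_other_possible_code_words(curr_code_word, curr_index + 1, word_modified, word_list, required_count)
--     return word_list
-- ===== SOURCE B (Python) =====
-- def get_other_possible_code_words(curr_code_word, curr_index, word_to_modify, word_list, required_count):
--     if len(word_list) >= required_count:
--         return word_list
--     prefix = "".join(word_to_modify[:curr_index])
--     tail = word_to_modify[curr_index:]
--     m = len(tail)
--     for mask in range(1 << m):
--         candidate = prefix + "".join("-" if (mask >> (m - 1 - j)) & 1 else tail[j] for j in range(m))
--         if curr_code_word not in candidate: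
--             word_list.append(candidate)
--             if len(word_list) >= required_count:
--                 break
--     return word_list
-- ===== Notes on version B (the rewrite author's own statement) =====
-- stated objective: alternative
-- what changed: Replaces A's exponential binary recursion (two recursive calls per position, threading the list through) by a single iterative loop over bitmasks 0..2^m-1 of the tail word_to_modify[curr_index:], generating the same dash-substituted candidates in the same keep-first order and appending until the count is reached.
-- outside the precondition, e.g. on get_other_possible_code_words('a', -1, ['a'], [], 2): A returns ['-', '-'], B returns ['-']
import Mathlib
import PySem

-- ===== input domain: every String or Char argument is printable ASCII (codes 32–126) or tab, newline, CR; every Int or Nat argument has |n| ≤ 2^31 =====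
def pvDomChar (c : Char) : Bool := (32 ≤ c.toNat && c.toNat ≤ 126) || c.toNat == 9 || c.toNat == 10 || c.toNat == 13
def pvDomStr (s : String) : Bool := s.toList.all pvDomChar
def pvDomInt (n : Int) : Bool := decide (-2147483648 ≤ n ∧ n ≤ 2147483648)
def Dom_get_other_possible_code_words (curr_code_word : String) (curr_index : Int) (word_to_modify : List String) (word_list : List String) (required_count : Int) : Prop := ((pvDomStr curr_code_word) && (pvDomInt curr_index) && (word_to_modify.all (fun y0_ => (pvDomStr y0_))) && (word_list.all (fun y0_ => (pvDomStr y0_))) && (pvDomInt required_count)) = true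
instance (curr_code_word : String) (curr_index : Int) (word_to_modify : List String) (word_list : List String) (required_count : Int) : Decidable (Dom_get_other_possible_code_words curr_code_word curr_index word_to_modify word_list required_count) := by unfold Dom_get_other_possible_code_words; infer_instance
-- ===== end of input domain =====

-- B replaces A's exponential binary DFS by one iterative loop over bitmasks (keep/'-' patterns of the tail),
-- appending the same candidates in the same order; same cost, different decomposition (objective: alternative).
-- Both programs mutate word_list in place in Python; the equivalence proved here is about the return value
-- (inside Pre_ the appended elements coincide, so the mutation coincides too).

-- ===== PORT A =====
def get_other_possible_code_words (curr_code_word : String) (curr_index : Int) (word_to_modify : List String) (word_list : List String) (required_count : Int) : List String :=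
  if required_count ≤ (word_list.length : Int) then word_list
  else if h : (word_to_modify.length : Int) ≤ curr_index then
    let original_word_joined := PySem.Str.join "" word_to_modify
    if PySem.Str.isIn curr_code_word original_word_joined then word_list
    else word_list ++ [original_word_joined]
  else
    -- word_modified[curr_index] = "-" : total form pySetD; exact here since under Pre_ this branch has 0 ≤ curr_index < len
    let word_modified := PySem.List.pySetD word_to_modify curr_index "-"
    let word_list1 := get_other_possible_code_words curr_code_word (curr_index + 1) word_to_modify word_list required_count
    get_other_possible_code_words curr_code_word (curr_index + 1) word_modified word_list1 required_count
termination_by ((word_to_modify.length : Int) - curr_index).toNat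
decreasing_by
  · omega
  · simp only [PySem.List.length_pySetD]; omega

-- ===== PORT B =====
-- the candidate word for one bitmask: bit (m-1-j) set ⇒ position j of the tail becomes "-"
def pvMaskWord (tail : List String) (m mask : Nat) : List String :=
  (List.range m).map (fun j => if (mask >>> (m - 1 - j)) &&& 1 = 1 then "-" else tail.getD j "")
  -- tail.getD j "" = tail[j]; exact since j < m = len(tail)

def pvBLoop (curr_code_word pre : String) (tail : List String) (m : Nat) (required_count : Int) (masks : List Nat) (word_list : List String) : List String :=
  match masks with
  | [] => word_list
  | mask :: rest =>
    let candidate := pre ++ PySem.Str.join "" (pvMaskWord tail m mask)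
    if PySem.Str.isIn curr_code_word candidate then
      pvBLoop curr_code_word pre tail m required_count rest word_list
    else
      let word_list' := word_list ++ [candidate]
      if required_count ≤ (word_list'.length : Int) then word_list'
      else pvBLoop curr_code_word pre tail m required_count rest word_list'

def get_other_possible_code_words_alt (curr_code_word : String) (curr_index : Int) (word_to_modify : List String) (word_list : List String) (required_count : Int) : List String :=
  if required_count ≤ (word_list.length : Int) then word_list
  else
    let pre := PySem.Str.join "" (PySem.List.slice word_to_modify none (some curr_index))
    let tail := PySem.List.slice word_to_modify (some curr_index) none
    let m := tail.length
    pvBLoop curr_code_word pre tail m required_count (List.range (2 ^ m)) word_list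

-- ===== PRECONDITION & SPEC =====
-- Pre_ excludes negative curr_index while more words are still required: curr_index is a recursion index that
-- starts at 0 in the natural domain; on those inputs A raises IndexError when curr_index < -len(word_to_modify)
-- and otherwise toggles positions through Python's negative-index wraparound, an artefact of A's implementation,
-- while B reads curr_index as a prefix length.
def Pre_get_other_possible_code_words (curr_code_word : String) (curr_index : Int) (word_to_modify : List String) (word_list : List String) (required_count : Int) : Prop :=
  0 ≤ curr_index ∨ required_count ≤ (word_list.length : Int)
instance (curr_code_word : String) (curr_index : Int) (word_to_modify : List String) (word_list : List String) (required_count : Int) : Decidable (Pre_get_other_possible_code_words curr_code_word curr_index word_to_modify word_list required_count) := by unfold Pre_get_other_possible_code_words; infer_instance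

def pvWitness_get_other_possible_code_words : String × Int × List String × List String × Int := ("a", 0, ["a", "b"], [], 2)

def Spec_get_other_possible_code_words (curr_code_word : String) (curr_index : Int) (word_to_modify : List String) (word_list : List String) (required_count : Int) (out : List String) : Prop := out = get_other_possible_code_words_alt curr_code_word curr_index word_to_modify word_list required_count
instance (curr_code_word : String) (curr_index : Int) (word_to_modify : List String) (word_list : List String) (required_count : Int) (out : List String) : Decidable (Spec_get_other_possible_code_words curr_code_word curr_index word_to_modify word_list required_count out) := by unfold Spec_get_other_possible_code_words; infer_instance

-- ===== CLAIM (what is proved, stated in full; the proofs are below) =====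
def Claim_equal_get_other_possible_code_words : Prop := ∀ (curr_code_word : String) (curr_index : Int) (word_to_modify : List String) (word_list : List String) (required_count : Int), Dom_get_other_possible_code_words curr_code_word curr_index word_to_modify word_list required_count → Pre_get_other_possible_code_words curr_code_word curr_index word_to_modify word_list required_count → Spec_get_other_possible_code_words curr_code_word curr_index word_to_modify word_list required_count (get_other_possible_code_words curr_code_word curr_index word_to_modify word_list required_count)

-- ===== LEMMAS AND PROOFS =====

-- the leaf strings of A's DFS tree, in A's visit order
def pvLeaves (curr_index : Int) (word_to_modify : List String) : List String :=
  if h : (word_to_modify.length : Int) ≤ curr_index then [PySem.Str.join "" word_to_modify]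
  else
    pvLeaves (curr_index + 1) word_to_modify ++
      pvLeaves (curr_index + 1) (PySem.List.pySetD word_to_modify curr_index "-")
termination_by ((word_to_modify.length : Int) - curr_index).toNat
decreasing_by
  · omega
  · simp only [PySem.List.length_pySetD]; omega

-- the common "filter and append until the count is reached" consumer
def pvConsume (code : String) (rc : Int) (cands : List String) (wl : List String) : List String :=
  match cands with
  | [] => wl
  | s :: r =>
    if rc ≤ (wl.length : Int) then wl
    else if PySem.Str.isIn code s then pvConsume code rc r wl
    else pvConsume code rc r (wl ++ [s])

theorem pvConsume_of_full (code : String) (rc : Int) (l wl : List String) (h : rc ≤ (wl.length : Int)) :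
    pvConsume code rc l wl = wl := by
  cases l <;> simp [pvConsume, h]

theorem pvConsume_append (code : String) (rc : Int) (l1 l2 wl : List String) :
    pvConsume code rc (l1 ++ l2) wl = pvConsume code rc l2 (pvConsume code rc l1 wl) := by
  induction l1 generalizing wl with
  | nil => rfl
  | cons s r ih =>
    by_cases h : rc ≤ (wl.length : Int)
    · simp [pvConsume, h, pvConsume_of_full code rc l2 wl h]
    · simp only [List.cons_append, pvConsume, if_neg h]
      split
      · exact ih wl
      · exact ih (wl ++ [s])

theorem pvA_eq_consume (code : String) (rc : Int) :
    ∀ (fuel : Nat) (i : Int) (w wl : List String), ((w.length : Int) - i).toNat ≤ fuel →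
      get_other_possible_code_words code i w wl rc = pvConsume code rc (pvLeaves i w) wl := by
  intro fuel
  induction fuel with
  | zero =>
    intro i w wl hf
    have hlen : (w.length : Int) ≤ i := by omega
    rw [get_other_possible_code_words, pvLeaves]
    simp only [dif_pos hlen]
    by_cases hrc : rc ≤ (wl.length : Int) <;> simp [pvConsume, hrc]
  | succ f ih =>
    intro i w wl hf
    by_cases hlen : (w.length : Int) ≤ i
    · rw [get_other_possible_code_words, pvLeaves]
      simp only [dif_pos hlen]
      by_cases hrc : rc ≤ (wl.length : Int) <;> simp [pvConsume, hrc]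
    · rw [get_other_possible_code_words, pvLeaves]
      simp only [dif_neg hlen]
      by_cases hrc : rc ≤ (wl.length : Int)
      · simp only [if_pos hrc]
        rw [pvConsume_of_full code rc _ wl hrc]
      · simp only [if_neg hrc]
        rw [pvConsume_append]
        rw [ih (i + 1) w wl (by omega)]
        rw [ih (i + 1) (PySem.List.pySetD w i "-") _ (by simp only [PySem.List.length_pySetD]; omega)]

theorem pvBLoop_eq_consume (code pre : String) (tail : List String) (m : Nat) (rc : Int) :
    ∀ (masks : List Nat) (wl : List String), (wl.length : Int) < rc →
      pvBLoop code pre tail m rc masks wl =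
        pvConsume code rc (masks.map (fun mask => pre ++ PySem.Str.join "" (pvMaskWord tail m mask))) wl := by
  intro masks
  induction masks with
  | nil => intro wl _; rfl
  | cons mask rest ih =>
    intro wl hwl
    simp only [pvBLoop, List.map_cons, pvConsume, if_neg (not_le.mpr hwl)]
    split
    · exact ih wl hwl
    · split
      · next hfull => exact (pvConsume_of_full _ _ _ _ hfull).symm
      · next hfull =>
        exact ih _ (by simp only [List.length_append, List.length_cons, List.length_nil] at hfull ⊢; push_cast at hfull ⊢; omega)

theorem pvAnd1_eq (y k : Nat) : (y >>> k) &&& 1 = if y.testBit k then 1 else 0 := by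
  rw [Nat.and_one_is_mod, Nat.shiftRight_eq_div_pow, Nat.testBit_eq_decide_div_mod_eq]
  rcases Nat.mod_two_eq_zero_or_one (y / 2 ^ k) with h | h <;> simp [h]

theorem pvJoin_cons (a : String) (l : List String) :
    PySem.Str.join "" (a :: l) = a ++ PySem.Str.join "" l := by
  cases l with
  | nil => simp [PySem.Str.join, PySem.Chars.join_singleton, PySem.Chars.join_nil, String.ofList_toList]
  | cons b r => simp [PySem.Str.join, PySem.Chars.join_cons_cons, String.ofList_append, String.ofList_toList]

theorem pvJoin_nil : PySem.Str.join "" ([] : List String) = "" := by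
  simp [PySem.Str.join, PySem.Chars.join_nil]

theorem pvJoin_append (l1 l2 : List String) :
    PySem.Str.join "" (l1 ++ l2) = PySem.Str.join "" l1 ++ PySem.Str.join "" l2 := by
  induction l1 with
  | nil => simp [pvJoin_nil]
  | cons a r ih => simp [pvJoin_cons, ih, String.append_assoc]

theorem pvGetD_tail (l : List String) (j : Nat) (d : String) : l.tail.getD j d = l.getD (j + 1) d := by
  cases l <;> simp

theorem pvGetD_drop_zero (w : List String) (t : Nat) : (w.drop t).getD 0 "" = w.getD t "" := by
  simp [List.getD, List.getElem?_drop]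

theorem pvTake_succ (l : List String) (n : Nat) (h : n < l.length) :
    l.take (n + 1) = l.take n ++ [l.getD n ""] := by
  rw [List.take_add_one, List.getElem?_eq_getElem h]
  simp [List.getD, List.getElem?_eq_getElem h]

theorem pvTake_set (l : List String) (n : Nat) (v : String) (h : n < l.length) :
    (l.set n v).take (n + 1) = l.take n ++ [v] := by
  rw [pvTake_succ (l.set n v) n (by simpa using h), List.take_set]
  congr 1
  · exact List.set_eq_of_length_le (by simp [List.length_take])
  · simp [List.getD, h]

theorem pvDrop_set (l : List String) (n : Nat) (v : String) :
    (l.set n v).drop (n + 1) = l.drop (n + 1) := by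
  rw [List.drop_set]; simp

theorem pvMaskWord_succ (tail : List String) (m mask : Nat) :
    pvMaskWord tail (m + 1) mask =
      (if mask.testBit m then "-" else tail.getD 0 "") :: pvMaskWord tail.tail m mask := by
  unfold pvMaskWord
  rw [List.range_succ_eq_map, List.map_cons, List.map_map]
  congr 1
  · rw [pvAnd1_eq]
    simp only [Nat.add_sub_cancel, Nat.sub_zero]
    by_cases h : mask.testBit m <;> simp [h]
  · apply List.map_congr_left
    intro j hj
    rw [List.mem_range] at hj
    simp only [Function.comp_apply]
    have h1 : m + 1 - 1 - (j + 1) = m - 1 - j := by omega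
    rw [h1, pvGetD_tail]

theorem pvMaskWord_add_pow (tail : List String) (m mask : Nat) :
    pvMaskWord tail m (2 ^ m + mask) = pvMaskWord tail m mask := by
  unfold pvMaskWord
  apply List.map_congr_left
  intro j hj
  rw [List.mem_range] at hj
  rw [pvAnd1_eq, pvAnd1_eq, Nat.testBit_two_pow_add_gt (by omega)]

theorem pvLeaves_eq : ∀ (m : Nat) (i : Int) (w : List String), 0 ≤ i →
    ((w.length : Int) - i).toNat = m →
    pvLeaves i w =
      (List.range (2 ^ m)).map (fun mask =>
        PySem.Str.join "" (w.take i.toNat) ++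
          PySem.Str.join "" (pvMaskWord (w.drop i.toNat) m mask)) := by
  intro m
  induction m with
  | zero =>
    intro i w hi hm
    have hlen : (w.length : Int) ≤ i := by omega
    rw [pvLeaves, dif_pos hlen]
    have htake : w.take i.toNat = w := List.take_of_length_le (by omega)
    simp only [pow_zero, List.range_one, List.map_cons, List.map_nil, pvMaskWord, List.range_zero,
      pvJoin_nil, String.append_empty, htake]
  | succ m ih =>
    intro i w hi hm
    have htw : i.toNat < w.length := by omega
    have h1 : (i + 1).toNat = i.toNat + 1 := by omega
    rw [pvLeaves, dif_neg (by omega), PySem.List.pySetD_of_nonneg w "-" hi,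
      ih (i + 1) w (by omega) (by omega),
      ih (i + 1) (w.set i.toNat "-") (by omega) (by simp only [List.length_set]; omega), h1]
    have h2 : 2 ^ (m + 1) = 2 ^ m + 2 ^ m := by ring
    rw [h2, List.range_add, List.map_append, List.map_map]
    congr 1
    · apply List.map_congr_left
      intro mask hmask
      rw [List.mem_range] at hmask
      rw [pvMaskWord_succ, Nat.testBit_lt_two_pow hmask, List.tail_drop, pvGetD_drop_zero,
        pvTake_succ w i.toNat htw]
      simp [pvJoin_append, pvJoin_cons, pvJoin_nil, String.append_empty, String.append_assoc]
    · apply List.map_congr_left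
      intro mask hmask
      rw [List.mem_range] at hmask
      simp only [Function.comp_apply]
      rw [pvMaskWord_succ, Nat.testBit_two_pow_add_eq, Nat.testBit_lt_two_pow hmask,
        List.tail_drop, pvMaskWord_add_pow, pvTake_set w i.toNat "-" htw, pvDrop_set]
      simp [pvJoin_append, pvJoin_cons, pvJoin_nil, String.append_empty, String.append_assoc]

-- ===== VERDICT (by name: the statement is the Claim_ definition above) =====
theorem get_other_possible_code_words_spec : Claim_equal_get_other_possible_code_words := by
  intro code i w wl rc _ hpre
  unfold Spec_get_other_possible_code_words
  by_cases hrc : rc ≤ (wl.length : Int)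
  · rw [get_other_possible_code_words]
    simp [get_other_possible_code_words_alt, hrc]
  · have hi : 0 ≤ i := by
      rcases hpre with h | h
      · exact h
      · exact absurd h hrc
    rw [pvA_eq_consume code rc (((w.length : Int) - i).toNat) i w wl le_rfl]
    rw [get_other_possible_code_words_alt]
    simp only [if_neg hrc]
    rw [PySem.List.slice_to w hi, PySem.List.slice_from w hi]
    rw [pvBLoop_eq_consume code _ _ _ rc (List.range (2 ^ (w.drop i.toNat).length)) wl (by omega)]
    rw [pvLeaves_eq ((w.drop i.toNat).length) i w hi (by simp only [List.length_drop]; omega)]
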